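-- pv_equiv track=rewrite | github.com/qades/mem | src/membench/memory_stores/mempalace_store.py | _compress_aaak
-- ===== SOURCE A (Python) =====
-- def _compress_aaak(text: str) -> str:
--     """Compress text using AAAK dialect.
--
--     AAAK (AI Abbreviation Kompact) is MemPalace's compression scheme:
--     - Abbreviate common entities
--     - Drop filler words
--     - Keep technical terms intact
--     """
--     # Simple AAAK-like compression
--     abbreviations = {
--         "database": "DB",
--         "configuration": "config",
--         "authentication": "auth",
--         "authorization": "authz",
--         "application": "app",
--         "development": "dev",
--         "production": "prod",
--         "environment": "env",
--     }
--
--     result = text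
--     for word, abbrev in abbreviations.items():
--         result = result.replace(word, abbrev)
--
--     return result
-- ===== SOURCE B (Python) =====
-- def _compress_aaak(text: str) -> str:
--     """Compress text using AAAK dialect (single left-to-right pass)."""
--     abbreviations = {
--         "database": "DB",
--         "configuration": "config",
--         "authentication": "auth",
--         "authorization": "authz",
--         "application": "app",
--         "development": "dev",
--         "production": "prod",
--         "environment": "env",
--     }
--     out = []
--     i = 0
--     n = len(text)
--     while i < n:
--         for word, abbrev in abbreviations.items():
--             if text.startswith(word, i):
--                 out.append(abbrev)
--                 i += len(word)
--                 break
--         else: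
--             out.append(text[i])
--             i += 1
--     return "".join(out)
-- ===== Notes on version B (the rewrite author's own statement) =====
-- stated objective: alternative
-- what changed: Replaces the eight sequential full-text str.replace passes by one left-to-right scan that at each position tries the abbreviation keys in dict order, emits the abbreviation and skips the key on a match, otherwise copies the character.
-- outside the precondition, e.g. on _compress_aaak('authenticationorization'): A returns 'authz', B returns 'authorization'; on _compress_aaak('applicationroduction'): A returns 'approd', B returns 'approduction'
import Mathlib
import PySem

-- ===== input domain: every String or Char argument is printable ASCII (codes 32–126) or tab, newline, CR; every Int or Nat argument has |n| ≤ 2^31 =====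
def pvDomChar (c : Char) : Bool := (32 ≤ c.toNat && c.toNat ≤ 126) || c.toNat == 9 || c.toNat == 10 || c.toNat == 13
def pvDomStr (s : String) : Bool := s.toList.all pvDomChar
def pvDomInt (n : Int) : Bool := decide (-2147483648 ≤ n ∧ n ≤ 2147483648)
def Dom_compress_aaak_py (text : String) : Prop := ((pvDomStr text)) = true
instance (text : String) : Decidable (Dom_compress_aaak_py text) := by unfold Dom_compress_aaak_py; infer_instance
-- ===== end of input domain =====

-- B replaces A's eight sequential full-text str.replace passes by one left-to-right scan
-- that tries the abbreviation keys in dict order at each position (objective: alternative).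

-- ===== PORT A =====
-- the abbreviations dict of A, as an association list in insertion order
def aAbbrev : List (String × String) :=
  [("database", "DB"), ("configuration", "config"), ("authentication", "auth"),
   ("authorization", "authz"), ("application", "app"), ("development", "dev"),
   ("production", "prod"), ("environment", "env")]

def compress_aaak_py (text : String) : String :=
  aAbbrev.foldl (fun result wv => PySem.Str.replace result wv.1 wv.2) text

-- ===== PORT B =====
-- the same dict, over List Char (B scans character positions)
def bAbbrev : List (List Char × List Char) :=
  [("database".toList, "DB".toList), ("configuration".toList, "config".toList),
   ("authentication".toList, "auth".toList), ("authorization".toList, "authz".toList),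
   ("application".toList, "app".toList), ("development".toList, "dev".toList),
   ("production".toList, "prod".toList), ("environment".toList, "env".toList)]

-- B's while-loop: at each position try the keys in dict order; on a match emit the
-- abbreviation and skip the key, else copy the character.  (rest.drop (len-1) is
-- (c :: rest).drop len for the nonempty keys; phrased on rest for termination.)
def scanP (ps : List (List Char × List Char)) : List Char → List Char
  | [] => []
  | c :: rest =>
    match ps.find? (fun wv => wv.1.isPrefixOf (c :: rest)) with
    | some wv => wv.2 ++ scanP ps (rest.drop (wv.1.length - 1))
    | none => c :: scanP ps rest
termination_by l => l.length
decreasing_by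
  · simp only [List.length_drop, List.length_cons]; omega
  · simp only [List.length_cons]; omega

def compress_aaak_py_alt (text : String) : String :=
  String.ofList (scanP bAbbrev text.toList)

-- ===== PRECONDITION & SPEC =====
-- Pre_ excludes texts containing "authenticationorization" or "applicationroduction":
-- there A's sequential replaces cascade (the output of an earlier replacement merges with
-- the following characters into a match of a later key) while B's single pass does not;
-- on such overlapping inputs both results are defensible and no caller would specify either.
def Pre_compress_aaak_py (text : String) : Prop :=
  PySem.Str.isIn "authenticationorization" text = false ∧
  PySem.Str.isIn "applicationroduction" text = false
instance (text : String) : Decidable (Pre_compress_aaak_py text) := by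
  unfold Pre_compress_aaak_py; infer_instance
def pvWitness_compress_aaak_py : String := "the production database environment"

def Spec_compress_aaak_py (text : String) (out : String) : Prop := out = compress_aaak_py_alt text
instance (text : String) (out : String) : Decidable (Spec_compress_aaak_py text out) := by unfold Spec_compress_aaak_py; infer_instance

-- ===== CLAIM (what is proved, stated in full; the proofs are below) =====
def Claim_equal_compress_aaak_py : Prop := ∀ (text : String), Dom_compress_aaak_py text → Pre_compress_aaak_py text → Spec_compress_aaak_py text (compress_aaak_py text)

-- ===== LEMMAS AND PROOFS =====

-- --- unfolding lemmas for PySem.Chars.replace (nonempty pattern) ---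

theorem replGo_acc (old new : List Char) :
    ∀ (fuel : Nat) (l acc : List Char),
      PySem.Chars.replace.go old new fuel l acc =
        acc.reverse ++ PySem.Chars.replace.go old new fuel l [] := by
  intro fuel
  induction fuel with
  | zero => intro l acc; simp [PySem.Chars.replace.go]
  | succ n ih =>
    intro l acc
    cases l with
    | nil => simp [PySem.Chars.replace.go]
    | cons c t =>
      rw [PySem.Chars.replace.go, PySem.Chars.replace.go]
      by_cases h : old.isPrefixOf (c::t) = true
      · simp only [h, if_pos]
        rw [ih _ (new.reverse ++ acc), ih _ (new.reverse ++ [])]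
        simp
      · simp only [eq_false_of_ne_true h, if_neg, Bool.false_eq_true, not_false_iff]
        rw [ih t (c :: acc), ih t [c]]
        simp

theorem replGo_fuel (old new : List Char) (hold : old ≠ []) :
    ∀ (fuel fuel' : Nat) (l acc : List Char), l.length ≤ fuel → l.length ≤ fuel' →
      PySem.Chars.replace.go old new fuel l acc =
        PySem.Chars.replace.go old new fuel' l acc := by
  intro fuel
  induction fuel with
  | zero =>
    intro fuel' l acc h1 h2
    have : l = [] := by cases l <;> simp_all
    subst this
    cases fuel' <;> simp [PySem.Chars.replace.go]
  | succ n ih =>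
    intro fuel' l acc h1 h2
    cases l with
    | nil => cases fuel' <;> simp [PySem.Chars.replace.go]
    | cons c t =>
      cases fuel' with
      | zero => simp at h2
      | succ m =>
        rw [PySem.Chars.replace.go, PySem.Chars.replace.go]
        by_cases h : old.isPrefixOf (c::t) = true
        · simp only [h, if_pos]
          have hlen : 1 ≤ old.length := by cases old <;> simp_all
          apply ih
          · simp only [List.length_drop, List.length_cons] at *; omega
          · simp only [List.length_drop, List.length_cons] at *; omega
        · simp only [eq_false_of_ne_true h, Bool.false_eq_true, if_neg, not_false_iff]
          apply ih <;> simp_all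

theorem repl_nil (old new : List Char) (hold : old ≠ []) :
    PySem.Chars.replace [] old new = [] := by
  have : old.isEmpty = false := by cases old <;> simp_all
  simp [PySem.Chars.replace, this, PySem.Chars.replace.go]

theorem repl_cons (old new : List Char) (hold : old ≠ []) (c : Char) (t : List Char)
    (h : ¬ old <+: (c :: t)) :
    PySem.Chars.replace (c :: t) old new = c :: PySem.Chars.replace t old new := by
  have he : old.isEmpty = false := by cases old <;> simp_all
  have hp : old.isPrefixOf (c :: t) = false := by
    rw [← Bool.not_eq_true]; rw [List.isPrefixOf_iff_prefix]; exact h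
  simp only [PySem.Chars.replace, he, Bool.false_eq_true, if_neg, not_false_iff]
  rw [List.length_cons, PySem.Chars.replace.go, hp]
  simp only [Bool.false_eq_true, if_neg, not_false_iff]
  rw [replGo_acc]
  simp

theorem repl_prefix (old new : List Char) (hold : old ≠ []) (l : List Char)
    (h : old <+: l) :
    PySem.Chars.replace l old new = new ++ PySem.Chars.replace (l.drop old.length) old new := by
  have he : old.isEmpty = false := by cases old <;> simp_all
  have hlen : 1 ≤ old.length := by cases old <;> simp_all
  cases l with
  | nil =>
    have : old = [] := List.prefix_nil.mp h
    exact absurd this hold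
  | cons c t =>
    have hp : old.isPrefixOf (c :: t) = true := List.isPrefixOf_iff_prefix.mpr h
    simp only [PySem.Chars.replace, he, Bool.false_eq_true, if_neg, not_false_iff]
    rw [List.length_cons, PySem.Chars.replace.go, hp]
    simp only [if_pos]
    rw [replGo_acc]
    simp only [List.reverse_reverse, List.append_nil]
    congr 1
    apply replGo_fuel old new hold
    · simp only [List.length_drop, List.length_cons]; omega
    · simp

theorem repl_append_front (old new : List Char) (hold : old ≠ []) :
    ∀ (x y : List Char), (∀ p, p < x.length → ¬ old <+: (x ++ y).drop p) →
      PySem.Chars.replace (x ++ y) old new = x ++ PySem.Chars.replace y old new := by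
  intro x
  induction x with
  | nil => intro y _; simp
  | cons c x' ih =>
    intro y hx
    have h0 : ¬ old <+: (c :: (x' ++ y)) := by simpa using hx 0 (by simp)
    rw [List.cons_append, repl_cons old new hold c (x' ++ y) h0,
        ih y (fun p hp => by simpa using hx (p + 1) (by simpa using hp))]
    simp

-- --- lemmas about B's scan ---

theorem scanP_id : ∀ (l : List Char), scanP [] l = l := by
  intro l
  induction l with
  | nil => simp [scanP]
  | cons c rest ih => rw [scanP]; simp [ih]

-- where no key matches in the first m positions, the scan copies those characters
theorem scanP_skip (ps : List (List Char × List Char)) :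
    ∀ (m : Nat) (l : List Char),
      (∀ p, p < m → ps.find? (fun wv => wv.1.isPrefixOf (l.drop p)) = none) →
      scanP ps l = l.take m ++ scanP ps (l.drop m) := by
  intro m
  induction m with
  | zero => intro l _; simp
  | succ n ih =>
    intro l h
    cases l with
    | nil => simp
    | cons c rest =>
      have h0 : ps.find? (fun wv => wv.1.isPrefixOf (c :: rest)) = none := by
        simpa using h 0 (by omega)
      rw [scanP, h0]
      simp only [List.take_succ_cons, List.drop_succ_cons, List.cons_append, List.cons.injEq,
        true_and]
      exact ih rest (fun p hp => by simpa using h (p + 1) (by omega))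

-- if no value of ps is prefix-comparable with any suffix of s, a scan output starting
-- with s forces the input to start with s
theorem scanP_pull (ps : List (List Char × List Char)) :
    ∀ (l s : List Char), s ≠ [] →
      (∀ q, q < s.length → ∀ wv ∈ ps, ¬ (wv.2 <+: s.drop q) ∧ ¬ (s.drop q <+: wv.2)) →
      s <+: scanP ps l → s <+: l := by
  have aux : ∀ (n : Nat) (l : List Char), l.length ≤ n → ∀ (s : List Char), s ≠ [] →
      (∀ q, q < s.length → ∀ wv ∈ ps, ¬ (wv.2 <+: s.drop q) ∧ ¬ (s.drop q <+: wv.2)) →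
      s <+: scanP ps l → s <+: l := by
    intro n
    induction n with
    | zero =>
      intro l hl s hs _ hpre
      have : l = [] := by cases l <;> simp_all
      subst this
      rw [scanP] at hpre
      exact absurd (List.prefix_nil.mp hpre) hs
    | succ n ih =>
      intro l hl s hs hcomp hpre
      cases l with
      | nil =>
        rw [scanP] at hpre
        exact absurd (List.prefix_nil.mp hpre) hs
      | cons c rest =>
        cases hf : ps.find? (fun wv => wv.1.isPrefixOf (c :: rest)) with
        | some wv =>
          have hmem := List.mem_of_find?_eq_some hf
          rw [scanP, hf] at hpre
          have hslen : 0 < s.length := by cases s <;> simp_all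
          rcases List.prefix_or_prefix_of_prefix hpre (List.prefix_append _ _) with h | h
          · exact absurd h (by simpa using (hcomp 0 hslen wv hmem).2)
          · exact absurd h (by simpa using (hcomp 0 hslen wv hmem).1)
        | none =>
          rw [scanP, hf] at hpre
          cases s with
          | nil => exact absurd rfl hs
          | cons d s' =>
            obtain ⟨hd, hs'⟩ := List.cons_prefix_cons.mp hpre
            subst hd
            rcases eq_or_ne s' [] with h0 | h0
            · subst h0; exact List.cons_prefix_cons.mpr ⟨rfl, List.nil_prefix⟩
            · have : s' <+: rest := by
                apply ih rest (by simp at hl; omega) s' h0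
                · intro q hq wv hw
                  simpa using hcomp (q + 1) (by simp; omega) wv hw
                · exact hs'
              exact List.cons_prefix_cons.mpr ⟨rfl, this⟩
  intro l s hs hcomp hpre
  exact aux l.length l le_rfl s hs hcomp hpre

-- one pipeline stage: applying replace(k→v) to the scan with key set ps is the scan
-- with key set ps ++ [(k,v)], provided the cascade patterns wv.1 ++ k-tail are absent
theorem stage (ps : List (List Char × List Char)) (k v : List Char)
    (hk : k ≠ [])
    (hkeys : ∀ wv ∈ ps, wv.1 ≠ [])
    (hlen : ∀ wv ∈ ps, wv.2.length < k.length)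
    (hsuf : ∀ j, j < k.length → 0 < j → ∀ wv ∈ ps,
      ¬ (wv.2 <+: k.drop j) ∧ ¬ (k.drop j <+: wv.2))
    (hkeysuf : ∀ j, j < k.length → 0 < j → ∀ wv ∈ ps,
      ¬ (wv.1 <+: k.drop j) ∧ ¬ (k.drop j <+: wv.1)) :
    ∀ (l : List Char),
      (∀ wv ∈ ps, ∀ p, p < wv.2.length → wv.2.drop p <+: k →
        ¬ (wv.1 ++ k.drop (wv.2.length - p)) <:+: l) →
      PySem.Chars.replace (scanP ps l) k v = scanP (ps ++ [(k, v)]) l := by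
  have hk1 : 1 ≤ k.length := by cases k <;> simp_all
  have aux : ∀ (n : Nat) (l : List Char), l.length ≤ n →
      (∀ wv ∈ ps, ∀ p, p < wv.2.length → wv.2.drop p <+: k →
        ¬ (wv.1 ++ k.drop (wv.2.length - p)) <:+: l) →
      PySem.Chars.replace (scanP ps l) k v = scanP (ps ++ [(k, v)]) l := by
    intro n
    induction n with
    | zero =>
      intro l hl _
      have : l = [] := by cases l <;> simp_all
      subst this
      rw [scanP, scanP]
      exact repl_nil k v hk
    | succ n ih =>
      intro l hl hbadl
      -- the bad-pattern hypothesis descends to any drop of l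
      have hbadD : ∀ (m : Nat), ∀ wv ∈ ps, ∀ p, p < wv.2.length → wv.2.drop p <+: k →
          ¬ (wv.1 ++ k.drop (wv.2.length - p)) <:+: l.drop m := by
        intro m wv hw p hp hpre hcon
        exact hbadl wv hw p hp hpre (hcon.trans (List.IsSuffix.isInfix (List.drop_suffix m l)))
      cases l with
      | nil =>
        rw [scanP, scanP]
        exact repl_nil k v hk
      | cons c rest =>
        cases hf : ps.find? (fun wv => wv.1.isPrefixOf (c :: rest)) with
        | some wv =>
          have hmem := List.mem_of_find?_eq_some hf
          have hpf : wv.1 <+: (c :: rest) :=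
            List.isPrefixOf_iff_prefix.mp (by simpa using List.find?_some hf)
          have hne1 : wv.1 ≠ [] := hkeys wv hmem
          have hw1 : 1 ≤ wv.1.length := by cases h : wv.1 <;> simp_all
          have hD : rest.drop (wv.1.length - 1) = (c :: rest).drop wv.1.length := by
            cases hw : wv.1 with
            | nil => exact absurd hw hne1
            | cons a b => simp
          have hfind2 : (ps ++ [(k, v)]).find? (fun wv => wv.1.isPrefixOf (c :: rest)) = some wv := by
            simp [List.find?_append, hf]
          rw [scanP, scanP, hf, hfind2]
          -- no k-match can start inside the emitted value wv.2
          have hnomatch : ∀ p, p < wv.2.length →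
              ¬ k <+: (wv.2 ++ scanP ps (rest.drop (wv.1.length - 1))).drop p := by
            intro p hp hkpre
            rw [List.drop_append_of_le_length (le_of_lt hp)] at hkpre
            rcases List.prefix_or_prefix_of_prefix hkpre (List.prefix_append _ _) with h | h
            · have h1 := List.IsPrefix.length_le h
              have h2 := hlen wv hmem
              simp only [List.length_drop] at h1
              omega
            · -- wv.2.drop p <+: k : the cascade pattern, excluded by hbadl
              have hm1 : 1 ≤ wv.2.length - p := by omega
              have hmk : wv.2.length - p < k.length := by have := hlen wv hmem; omega
              have hs2 : k.drop (wv.2.length - p) <+: scanP ps (rest.drop (wv.1.length - 1)) := by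
                have htake : k.take (wv.2.length - p) = wv.2.drop p := by
                  have hlendrop : (wv.2.drop p).length = wv.2.length - p := by simp
                  rw [← hlendrop]
                  exact (List.prefix_iff_eq_take.mp h).symm
                have hsplit : k.take (wv.2.length - p) ++ k.drop (wv.2.length - p) <+:
                    wv.2.drop p ++ scanP ps (rest.drop (wv.1.length - 1)) := by
                  rw [List.take_append_drop]; exact hkpre
                rw [htake] at hsplit
                exact (List.prefix_append_right_inj _).mp hsplit
              have hs2ne : k.drop (wv.2.length - p) ≠ [] := by
                intro hcon
                apply_fun List.length at hcon
                simp only [List.length_drop, List.length_nil] at hcon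
                omega
              have hpull : k.drop (wv.2.length - p) <+: rest.drop (wv.1.length - 1) := by
                apply scanP_pull ps _ _ hs2ne _ hs2
                intro q hq wv' hw'
                have hql : wv.2.length - p + q < k.length := by
                  simp only [List.length_drop] at hq; omega
                have := hsuf (wv.2.length - p + q) hql (by omega) wv' hw'
                simpa [List.drop_drop, Nat.add_comm] using this
              apply hbadl wv hmem p hp h
              apply List.IsPrefix.isInfix
              have h1 : (c :: rest).take wv.1.length = wv.1 :=
                (List.prefix_iff_eq_take.mp hpf).symm
              conv_rhs => rw [← List.take_append_drop wv.1.length (c :: rest)]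
              rw [h1]
              exact (List.prefix_append_right_inj wv.1).mpr (hD ▸ hpull)
          rw [repl_append_front k v hk wv.2 _ hnomatch]
          congr 1
          apply ih
          · simp only [List.length_drop, List.length_cons] at *; omega
          · intro wv' hw' p hp hpre
            have := hbadD wv.1.length wv' hw' p hp hpre
            rwa [← hD] at this
        | none =>
          by_cases hkp : k <+: (c :: rest)
          · -- the new key matches at the front
            have hfind2 : (ps ++ [(k, v)]).find? (fun wv => wv.1.isPrefixOf (c :: rest)) =
                some (k, v) := by
              simp [List.find?_append, hf, List.isPrefixOf_iff_prefix.mpr hkp]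
            have htake : (c :: rest).take k.length = k := (List.prefix_iff_eq_take.mp hkp).symm
            have hskip : scanP ps (c :: rest) =
                (c :: rest).take k.length ++ scanP ps ((c :: rest).drop k.length) := by
              apply scanP_skip
              intro p hp
              rcases Nat.eq_zero_or_pos p with h0 | hpos
              · subst h0; simpa using hf
              · apply List.find?_eq_none.mpr
                intro wv hw hpred
                have hwp : wv.1 <+: (c :: rest).drop p :=
                  List.isPrefixOf_iff_prefix.mp (by simpa using hpred)
                have hdecomp : (c :: rest).drop p = k.drop p ++ (c :: rest).drop k.length := by
                  conv_lhs => rw [← List.take_append_drop k.length (c :: rest)]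
                  rw [htake, List.drop_append_of_le_length (le_of_lt hp)]
                rw [hdecomp] at hwp
                rcases List.prefix_or_prefix_of_prefix hwp (List.prefix_append _ _) with h | h
                · exact (hkeysuf p hp hpos wv hw).1 h
                · exact (hkeysuf p hp hpos wv hw).2 h
            have e2 : scanP (ps ++ [(k, v)]) (c :: rest) =
                v ++ scanP (ps ++ [(k, v)]) (rest.drop (k.length - 1)) := by
              rw [scanP, hfind2]
            rw [e2, hskip, htake,
                repl_prefix k v hk _ (List.prefix_append k _), List.drop_left]
            congr 1
            have hD : rest.drop (k.length - 1) = (c :: rest).drop k.length := by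
              cases hkc : k with
              | nil => exact absurd hkc hk
              | cons d k' => simp
            rw [← hD]
            apply ih
            · simp only [List.length_drop, List.length_cons] at *; omega
            · intro wv' hw' p hp hpre
              have := hbadD k.length wv' hw' p hp hpre
              rwa [← hD] at this
          · -- no key at all matches at the front
            have hfind2 : (ps ++ [(k, v)]).find? (fun wv => wv.1.isPrefixOf (c :: rest)) =
                none := by
              simp [List.find?_append, hf, List.isPrefixOf_iff_prefix, hkp]
            rw [scanP, scanP, hf, hfind2]
            have hnk : ¬ k <+: (c :: scanP ps rest) := by
              intro hcon
              cases k with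
              | nil => exact hk rfl
              | cons d k' =>
                obtain ⟨hd, hk'⟩ := List.cons_prefix_cons.mp hcon
                subst hd
                rcases eq_or_ne k' [] with h0 | h0
                · exact hkp (by subst h0; exact List.cons_prefix_cons.mpr ⟨rfl, List.nil_prefix⟩)
                · have hk'rest : k' <+: rest := by
                    apply scanP_pull ps rest k' h0 _ hk'
                    intro q hq wv' hw'
                    have := hsuf (q + 1)
                      (by simp only [List.length_cons]; omega) (by omega) wv' hw'
                    simpa using this
                  exact hkp (List.cons_prefix_cons.mpr ⟨rfl, hk'rest⟩)
            rw [repl_cons k v hk c _ hnk]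
            congr 1
            apply ih
            · simp only [List.length_cons] at hl; omega
            · intro wv' hw' p hp hpre
              simpa using hbadD 1 wv' hw' p hp hpre
  intro l hbadl
  exact aux l.length l le_rfl hbadl

-- the char-level pipeline of A
def aChain (l : List Char) : List Char :=
  (bAbbrev).foldl (fun s wv => PySem.Chars.replace s wv.1 wv.2) l

set_option maxHeartbeats 1600000 in
theorem aChain_eq_scan (l : List Char)
    (h1 : ¬ "authenticationorization".toList <:+: l)
    (h2 : ¬ "applicationroduction".toList <:+: l) :
    aChain l = scanP bAbbrev l := by
  -- abbreviate the eight pairs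
  have easy : ∀ (ps : List (List Char × List Char)) (k : List Char),
      (∀ wv ∈ ps, ∀ p, p < wv.2.length → ¬ (wv.2.drop p <+: k)) →
      (∀ wv ∈ ps, ∀ p, p < wv.2.length → wv.2.drop p <+: k →
        ¬ (wv.1 ++ k.drop (wv.2.length - p)) <:+: l) :=
    fun ps k hno wv hw p hp hpre => absurd hpre (hno wv hw p hp)
  have s1 := stage [] "database".toList "DB".toList (by decide) (by decide) (by decide)
    (by decide) (by decide) l (easy _ _ (by decide))
  rw [scanP_id l] at s1
  have s2 := stage [("database".toList, "DB".toList)] "configuration".toList "config".toList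
    (by decide) (by decide) (by decide) (by decide) (by decide) l (easy _ _ (by decide))
  have s3 := stage [("database".toList, "DB".toList),
      ("configuration".toList, "config".toList)] "authentication".toList "auth".toList
    (by decide) (by decide) (by decide) (by decide) (by decide) l (easy _ _ (by decide))
  have s4 := stage [("database".toList, "DB".toList),
      ("configuration".toList, "config".toList),
      ("authentication".toList, "auth".toList)] "authorization".toList "authz".toList
    (by decide) (by decide) (by decide) (by decide) (by decide) l ?hbad4
  case hbad4 =>
    intro wv hw
    fin_cases hw
    · exact fun p hp hpre _ => absurd hpre
        ((by decide : ∀ p, p < ("DB".toList).length →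
          ¬ (("DB".toList).drop p <+: "authorization".toList)) p hp)
    · exact fun p hp hpre _ => absurd hpre
        ((by decide : ∀ p, p < ("config".toList).length →
          ¬ (("config".toList).drop p <+: "authorization".toList)) p hp)
    · intro p hp hpre hcon
      rcases Nat.eq_zero_or_pos p with rfl | hpos
      · exact h1 (List.IsInfix.trans (by decide) hcon)
      · exact absurd hpre ((by decide : ∀ p, p < ("auth".toList).length → 0 < p →
          ¬ (("auth".toList).drop p <+: "authorization".toList)) p hp hpos)
  have s5 := stage [("database".toList, "DB".toList),
      ("configuration".toList, "config".toList),
      ("authentication".toList, "auth".toList),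
      ("authorization".toList, "authz".toList)] "application".toList "app".toList
    (by decide) (by decide) (by decide) (by decide) (by decide) l (easy _ _ (by decide))
  have s6 := stage [("database".toList, "DB".toList),
      ("configuration".toList, "config".toList),
      ("authentication".toList, "auth".toList),
      ("authorization".toList, "authz".toList),
      ("application".toList, "app".toList)] "development".toList "dev".toList
    (by decide) (by decide) (by decide) (by decide) (by decide) l (easy _ _ (by decide))
  have s7 := stage [("database".toList, "DB".toList),
      ("configuration".toList, "config".toList),
      ("authentication".toList, "auth".toList),
      ("authorization".toList, "authz".toList),
      ("application".toList, "app".toList),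
      ("development".toList, "dev".toList)] "production".toList "prod".toList
    (by decide) (by decide) (by decide) (by decide) (by decide) l ?hbad7
  case hbad7 =>
    intro wv hw
    fin_cases hw
    · exact fun p hp hpre _ => absurd hpre
        ((by decide : ∀ p, p < ("DB".toList).length →
          ¬ (("DB".toList).drop p <+: "production".toList)) p hp)
    · exact fun p hp hpre _ => absurd hpre
        ((by decide : ∀ p, p < ("config".toList).length →
          ¬ (("config".toList).drop p <+: "production".toList)) p hp)
    · exact fun p hp hpre _ => absurd hpre
        ((by decide : ∀ p, p < ("auth".toList).length →
          ¬ (("auth".toList).drop p <+: "production".toList)) p hp)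
    · exact fun p hp hpre _ => absurd hpre
        ((by decide : ∀ p, p < ("authz".toList).length →
          ¬ (("authz".toList).drop p <+: "production".toList)) p hp)
    · intro p hp hpre hcon
      rcases p with _ | _ | _ | q
      · exact absurd hpre (by decide)
      · exact absurd hpre (by decide)
      · exact h2 (List.IsInfix.trans (by decide) hcon)
      · exfalso
        have e : ("app".toList).length = 3 := by decide
        rw [e] at hp
        omega
    · exact fun p hp hpre _ => absurd hpre
        ((by decide : ∀ p, p < ("dev".toList).length →
          ¬ (("dev".toList).drop p <+: "production".toList)) p hp)
  have s8 := stage [("database".toList, "DB".toList),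
      ("configuration".toList, "config".toList),
      ("authentication".toList, "auth".toList),
      ("authorization".toList, "authz".toList),
      ("application".toList, "app".toList),
      ("development".toList, "dev".toList),
      ("production".toList, "prod".toList)] "environment".toList "env".toList
    (by decide) (by decide) (by decide) (by decide) (by decide) l (easy _ _ (by decide))
  simp only [List.cons_append, List.nil_append] at s1 s2 s3 s4 s5 s6 s7 s8
  show PySem.Chars.replace (PySem.Chars.replace (PySem.Chars.replace (PySem.Chars.replace
      (PySem.Chars.replace (PySem.Chars.replace (PySem.Chars.replace (PySem.Chars.replace l
      "database".toList "DB".toList) "configuration".toList "config".toList)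
      "authentication".toList "auth".toList) "authorization".toList "authz".toList)
      "application".toList "app".toList) "development".toList "dev".toList)
      "production".toList "prod".toList) "environment".toList "env".toList = scanP bAbbrev l
  rw [s1, s2, s3, s4, s5, s6, s7, s8]
  rfl

-- ===== VERDICT (by name: the statement is the Claim_ definition above) =====
theorem compress_aaak_py_spec : Claim_equal_compress_aaak_py := by
  intro text _hdom hpre
  obtain ⟨hp1, hp2⟩ := hpre
  have h1 : ¬ "authenticationorization".toList <:+: text.toList := by
    rw [← PySem.Chars.isIn_eq_false_iff]
    simpa using hp1
  have h2 : ¬ "applicationroduction".toList <:+: text.toList := by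
    rw [← PySem.Chars.isIn_eq_false_iff]
    simpa using hp2
  unfold Spec_compress_aaak_py
  apply String.toList_inj.mp
  have hA : (compress_aaak_py text).toList = aChain text.toList := by
    simp [compress_aaak_py, aAbbrev, aChain, bAbbrev, List.foldl]
  have hB : (compress_aaak_py_alt text).toList = scanP bAbbrev text.toList := by
    simp [compress_aaak_py_alt, String.toList_ofList]
  rw [hA, hB]
  exact aChain_eq_scan text.toList h1 h2
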